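-- pv_equiv track=rewrite | github.com/MLI-lab/TReconLM | DeepLearningBaselines/RobuSeqNet/examples/inference.py | group_clusters
-- ===== SOURCE A (Python) =====
-- def group_clusters(reads):
--     clusters = []
--     cur = []
--     for line in reads:
--         if line.startswith("="):
--             if cur:
--                 clusters.append(cur)
--             cur = []
--         else:
--             cur.append(line)
--     if cur:
--         clusters.append(cur)
--     return clusters
-- ===== SOURCE B (Python) =====
-- def group_clusters(reads):
--     # Boundary-index method: find all delimiter positions, then slice the
--     # non-empty segments strictly between consecutive boundaries.
--     bounds = [-1] + [i for i, line in enumerate(reads) if line.startswith("=")] + [len(reads)]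
--     return [reads[a + 1:b] for a, b in zip(bounds, bounds[1:]) if b - a > 1]
-- ===== Notes on version B (the rewrite author's own statement) =====
-- stated objective: alternative
-- what changed: Replaces A's single-pass accumulator loop by a two-stage boundary-index method: collect the positions of '='-prefixed lines, then slice the non-empty segments between consecutive boundaries.
import Mathlib
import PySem

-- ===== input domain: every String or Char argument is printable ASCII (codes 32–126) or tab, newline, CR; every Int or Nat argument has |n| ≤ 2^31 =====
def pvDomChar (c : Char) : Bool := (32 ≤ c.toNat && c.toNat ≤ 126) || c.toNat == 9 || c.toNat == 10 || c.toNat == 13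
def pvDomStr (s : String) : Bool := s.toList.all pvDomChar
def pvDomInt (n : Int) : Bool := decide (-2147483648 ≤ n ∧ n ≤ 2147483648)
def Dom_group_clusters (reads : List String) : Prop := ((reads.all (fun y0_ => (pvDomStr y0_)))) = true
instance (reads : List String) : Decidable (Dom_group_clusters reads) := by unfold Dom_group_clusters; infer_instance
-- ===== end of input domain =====

-- B replaces A's single-pass accumulator loop by a two-stage boundary-index method
-- (delimiter positions, then slices between consecutive boundaries); alternative, same O(n) cost.

-- ===== PORT A =====
-- the loop state is (clusters, cur); the trailing 'if cur' flush is the base case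
def group_clusters_loop (clusters : List (List String)) (cur : List String) :
    List String → List (List String)
  | [] => if cur ≠ [] then clusters ++ [cur] else clusters
  | line :: rest =>
      if PySem.Str.startswith line "=" then
        group_clusters_loop (if cur ≠ [] then clusters ++ [cur] else clusters) [] rest
      else
        group_clusters_loop clusters (cur ++ [line]) rest

def group_clusters (reads : List String) : List (List String) :=
  group_clusters_loop [] [] reads

-- ===== PORT B =====
def isDelim (s : String) : Bool := PySem.Str.startswith s "="

-- bounds = [-1] + [i for i, line in enumerate(reads) if line.startswith("=")] + [len(reads)]
def boundsB (reads : List String) : List Int :=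
  -1 :: ((PySem.List.enumerate reads).filter (fun p => isDelim p.2)).map (fun p => p.1)
     ++ [(reads.length : Int)]

-- [reads[a+1:b] for a, b in zip(bounds, bounds[1:]) if b - a > 1]
def group_clusters_alt (reads : List String) : List (List String) :=
  (((boundsB reads).zip (boundsB reads).tail).filter (fun p => p.2 - p.1 > 1)).map
    (fun p => PySem.List.slice reads (some (p.1 + 1)) (some p.2))

-- ===== PRECONDITION & SPEC =====
def Spec_group_clusters (reads : List String) (out : List (List String)) : Prop := out = group_clusters_alt reads
instance (reads : List String) (out : List (List String)) : Decidable (Spec_group_clusters reads out) := by unfold Spec_group_clusters; infer_instance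

-- ===== CLAIM (what is proved, stated in full; the proofs are below) =====
def Claim_equal_group_clusters : Prop := ∀ (reads : List String), Dom_group_clusters reads → Spec_group_clusters reads (group_clusters reads)

-- ===== LEMMAS AND PROOFS =====

-- common reference value: the splitOnP segments with the empty ones removed
-- A side ------------------------------------------------------------------

def gAux (cur : List String) : List String → List (List String)
  | [] => if cur ≠ [] then [cur] else []
  | l :: rest =>
      if isDelim l then (if cur ≠ [] then [cur] else []) ++ gAux [] rest
      else gAux (cur ++ [l]) rest

theorem loop_eq_gAux (xs : List String) :
    ∀ clusters cur, group_clusters_loop clusters cur xs = clusters ++ gAux cur xs := by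
  induction xs with
  | nil =>
      intro clusters cur
      simp only [group_clusters_loop, gAux]
      split_ifs <;> simp
  | cons l rest ih =>
      intro clusters cur
      simp only [group_clusters_loop, gAux, isDelim]
      split_ifs with h h2
      · rw [ih]; simp
      · rw [ih]; simp
      · exact ih _ _

theorem gAux_splitOnP (xs : List String) :
    ∀ cur, gAux cur xs =
      ((xs.splitOnP isDelim).modifyHead (cur ++ ·)).filter (fun s => decide (s ≠ [])) := by
  induction xs with
  | nil =>
      intro cur
      simp only [gAux, List.splitOnP_nil, List.modifyHead, List.append_nil, List.filter]
      split_ifs with h <;> simp [h]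
  | cons l rest ih =>
      intro cur
      by_cases h : isDelim l
      · have hrest := ih []
        cases hs : rest.splitOnP isDelim with
        | nil => exact absurd hs (List.splitOnP_ne_nil _ _)
        | cons s S =>
            rw [hs] at hrest
            simp only [List.modifyHead, List.nil_append] at hrest
            simp only [gAux, h, if_true, List.splitOnP_cons, hs, List.modifyHead,
              List.append_nil, hrest]
            rw [List.filter_cons]
            split_ifs with hc <;> simp_all
      · simp only [gAux, h, List.splitOnP_cons, ih (cur ++ [l])]
        cases hs : rest.splitOnP isDelim with
        | nil => exact absurd hs (List.splitOnP_ne_nil _ _)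
        | cons s S => simp [List.modifyHead]

theorem A_eq_ref (reads : List String) :
    group_clusters reads =
      (reads.splitOnP isDelim).filter (fun s => decide (s ≠ [])) := by
  have h := gAux_splitOnP reads []
  simp only [group_clusters, loop_eq_gAux, List.nil_append, h]
  cases hs : reads.splitOnP isDelim with
  | nil => exact absurd hs (List.splitOnP_ne_nil _ _)
  | cons s S => simp [List.modifyHead]

-- B side ------------------------------------------------------------------

def pairsOf (l : List Int) : List (Int × Int) := l.zip l.tail

theorem enumerate_shift {α : Type} (xs : List α) :
    ∀ (s : Int), PySem.List.enumerate xs (s + 1)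
      = (PySem.List.enumerate xs s).map (fun p => (p.1 + 1, p.2)) := by
  induction xs with
  | nil => intro s; simp [PySem.List.enumerate_nil]
  | cons x t ih =>
      intro s
      rw [PySem.List.enumerate_cons, PySem.List.enumerate_cons, ih (s + 1)]
      simp

theorem boundsB_cons (l : String) (xs : List String) :
    boundsB (l :: xs) =
      if isDelim l then -1 :: (boundsB xs).map (· + 1)
      else -1 :: ((boundsB xs).tail).map (· + 1) := by
  unfold boundsB
  rw [PySem.List.enumerate_cons, enumerate_shift xs 0]
  rw [List.filter_cons]
  by_cases h : isDelim l <;>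
    simp [h, List.filter_map, Function.comp_def, List.map_map]

theorem pairsOf_map_add_one (L : List Int) :
    pairsOf (L.map (· + 1)) = (pairsOf L).map (fun p => (p.1 + 1, p.2 + 1)) := by
  unfold pairsOf
  rw [← List.map_tail, List.zip_map]
  simp [Prod.map]

theorem mem_pairsOf {L : List Int} {p : Int × Int} (hp : p ∈ pairsOf L) :
    p.1 ∈ L ∧ p.2 ∈ L.tail := by
  obtain ⟨h1, h2⟩ := List.of_mem_zip hp
  exact ⟨h1, h2⟩

theorem boundsB_tail_nonneg (xs : List String) :
    ∀ b ∈ (boundsB xs).tail, 0 ≤ b := by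
  intro b hb
  unfold boundsB at hb
  rcases List.mem_append.mp hb with h1 | h2
  · obtain ⟨p, hp, rfl⟩ := List.mem_map.mp h1
    obtain ⟨k, hk, rfl⟩ :=
      (PySem.List.mem_enumerate_iff _ _ _).mp (List.mem_of_mem_filter hp)
    change (0 : Int) ≤ 0 + (k : Int)
    omega
  · rw [List.mem_singleton] at h2
    subst h2
    positivity

theorem boundsB_mem_ge (xs : List String) :
    ∀ a ∈ boundsB xs, -1 ≤ a := by
  intro a ha
  rcases List.mem_cons.mp ha with rfl | ha'
  · exact le_refl _
  · have := boundsB_tail_nonneg xs a (by simpa [boundsB] using ha')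
    omega

theorem slice_shift (l : String) (xs : List String) (a b : Int) (ha : 0 ≤ a) (hb : 0 ≤ b) :
    PySem.List.slice (l :: xs) (some (a + 1)) (some (b + 1))
      = PySem.List.slice xs (some a) (some b) := by
  rw [PySem.List.slice_toNat _ (by omega : (0:Int) ≤ a + 1) (by omega : (0:Int) ≤ b + 1),
      PySem.List.slice_toNat _ ha hb]
  have h1 : (a + 1).toNat = a.toNat + 1 := by omega
  have h2 : (b + 1).toNat = b.toNat + 1 := by omega
  simp [h1, h2]

theorem slice_cons_zero (l : String) (xs : List String) (b : Int) (hb : 0 ≤ b) :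
    PySem.List.slice (l :: xs) (some 0) (some (b + 1))
      = l :: PySem.List.slice xs (some 0) (some b) := by
  rw [PySem.List.slice_toNat _ (le_refl (0:Int)) (by omega : (0:Int) ≤ b + 1),
      PySem.List.slice_toNat _ (le_refl (0:Int)) hb]
  have h2 : (b + 1).toNat = b.toNat + 1 := by omega
  simp [h2]

-- the combined induction: each bounds pair carries both its slice and its keep-flag,
-- and they line up with the splitOnP segments and their non-emptiness
theorem pairs_slices_eq (xs : List String) :
    (pairsOf (boundsB xs)).map
        (fun p => (PySem.List.slice xs (some (p.1 + 1)) (some p.2), decide (p.2 - p.1 > 1)))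
      = (xs.splitOnP isDelim).map (fun s => (s, decide (s ≠ []))) := by
  induction xs with
  | nil => decide
  | cons l xs ih =>
      rw [boundsB_cons]
      by_cases h : isDelim l
      · -- delimiter: new head pair (-1, 0) yields the dropped empty segment
        rw [if_pos h]
        have hb : boundsB xs = -1 :: (boundsB xs).tail := by simp [boundsB]
        have hpairs : pairsOf (-1 :: (boundsB xs).map (· + 1))
            = (-1, 0) :: pairsOf ((boundsB xs).map (· + 1)) := by
          rw [hb]; rfl
        rw [hpairs, pairsOf_map_add_one, List.map_cons, List.map_map]
        have hpt : ((pairsOf (boundsB xs)).map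
              ((fun p => (PySem.List.slice (l :: xs) (some (p.1 + 1)) (some p.2),
                  decide (p.2 - p.1 > 1))) ∘ (fun p => (p.1 + 1, p.2 + 1))))
            = (pairsOf (boundsB xs)).map
              (fun p => (PySem.List.slice xs (some (p.1 + 1)) (some p.2),
                  decide (p.2 - p.1 > 1))) := by
          refine List.map_congr_left (fun p hp => ?_)
          obtain ⟨h1, h2⟩ := mem_pairsOf hp
          have ha : -1 ≤ p.1 := boundsB_mem_ge xs p.1 h1
          have hb2 : 0 ≤ p.2 := boundsB_tail_nonneg xs p.2 h2
          simp only [Function.comp_apply]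
          have harith : p.2 + 1 - (p.1 + 1) = p.2 - p.1 := by ring
          rw [show p.1 + 1 + 1 = (p.1 + 1) + 1 from rfl,
              slice_shift l xs (p.1 + 1) p.2 (by omega) hb2, harith]
        rw [hpt, ih, List.splitOnP_cons, if_pos h, List.map_cons]
        congr 1
      · -- non-delimiter: the head segment grows by l
        rw [if_neg h]
        obtain ⟨m, t, ht⟩ : ∃ m t, (boundsB xs).tail = m :: t :=
          List.exists_cons_of_ne_nil (by simp [boundsB])
        have hb : boundsB xs = -1 :: m :: t := by
          rw [show boundsB xs = -1 :: (boundsB xs).tail by simp [boundsB], ht]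
        have hm : 0 ≤ m := boundsB_tail_nonneg xs m (by rw [ht]; exact List.mem_cons_self)
        have htail_nonneg : ∀ b ∈ m :: t, 0 ≤ b := by
          intro b hbm; exact boundsB_tail_nonneg xs b (ht ▸ hbm)
        rw [ht]
        have hpairs : pairsOf (-1 :: (m :: t).map (· + 1))
            = (-1, m + 1) :: pairsOf ((m :: t).map (· + 1)) := by
          rfl
        rw [hpairs, pairsOf_map_add_one, List.map_cons, List.map_map]
        have hih := ih
        rw [hb] at hih
        have hpairs2 : pairsOf (-1 :: m :: t) = (-1, m) :: pairsOf (m :: t) := rfl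
        rw [hpairs2, List.map_cons] at hih
        cases hsp : xs.splitOnP isDelim with
        | nil => exact absurd hsp (List.splitOnP_ne_nil _ _)
        | cons s S =>
            rw [hsp, List.map_cons] at hih
            have hhead := (List.cons.injEq _ _ _ _ ▸ hih).1
            have htl := (List.cons.injEq _ _ _ _ ▸ hih).2
            simp only [Prod.mk.injEq] at hhead
            obtain ⟨hslice, hflag⟩ := hhead
            have hpt : ((pairsOf (m :: t)).map
                  ((fun p => (PySem.List.slice (l :: xs) (some (p.1 + 1)) (some p.2),
                      decide (p.2 - p.1 > 1))) ∘ (fun p => (p.1 + 1, p.2 + 1))))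
                = (pairsOf (m :: t)).map
                  (fun p => (PySem.List.slice xs (some (p.1 + 1)) (some p.2),
                      decide (p.2 - p.1 > 1))) := by
              refine List.map_congr_left (fun p hp => ?_)
              obtain ⟨h1, h2⟩ := mem_pairsOf hp
              have ha : 0 ≤ p.1 := htail_nonneg p.1 h1
              have hb2 : 0 ≤ p.2 := htail_nonneg p.2 (List.mem_of_mem_tail h2)
              simp only [Function.comp_apply]
              have harith : p.2 + 1 - (p.1 + 1) = p.2 - p.1 := by ring
              rw [show p.1 + 1 + 1 = (p.1 + 1) + 1 from rfl,
                  slice_shift l xs (p.1 + 1) p.2 (by omega) hb2, harith]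
            rw [hpt, htl, List.splitOnP_cons, if_neg h, hsp, List.modifyHead, List.map_cons]
            have hs0 : PySem.List.slice xs (some 0) (some m) = s := by
              rw [show (0 : Int) = -1 + 1 from by ring]
              exact hslice
            congr 1
            show (PySem.List.slice (l :: xs) (some (-1 + 1)) (some (m + 1)),
                decide (m + 1 - -1 > 1)) = (l :: s, decide (l :: s ≠ []))
            rw [show (-1 : Int) + 1 = 0 from by ring, slice_cons_zero l xs m hm, hs0]
            simp
            omega

-- commute filter-then-map with map-then-filter via the paired representation
theorem filter_map_of_paired {α β : Type} (c : α → Bool) (g : α → β) (c' : β → Bool) :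
    ∀ (ps : List α) (qs : List β),
      ps.map (fun p => (g p, c p)) = qs.map (fun s => (s, c' s)) →
      (ps.filter c).map g = qs.filter c' := by
  intro ps
  induction ps with
  | nil => intro qs h; cases qs <;> simp_all
  | cons p ps ih =>
      intro qs h
      cases qs with
      | nil => simp at h
      | cons q qs =>
          simp only [List.map_cons, List.cons.injEq, Prod.mk.injEq] at h
          obtain ⟨⟨hg, hc⟩, ht⟩ := h
          simp only [List.filter_cons, hc]
          split_ifs with hq <;> simp [hg, ih qs ht]

-- ===== VERDICT (by name: the statement is the Claim_ definition above) =====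
theorem group_clusters_spec : Claim_equal_group_clusters := by
  intro reads _
  unfold Spec_group_clusters
  rw [A_eq_ref, group_clusters_alt]
  exact (filter_map_of_paired _ _ _ _ _ (pairs_slices_eq reads)).symm
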